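-- pv_equiv track=rewrite | github.com/kimym56/42CoTe | yongmiki/힙/프로그래머스/1_더 맵게.py | solution
-- ===== SOURCE A (Python) =====
-- import heapq
--
-- def solution(scoville, K):
--     answer = 0
--     heapq.heapify(scoville)
--     while len(scoville)>1 :
--         min_scov = heapq.heappop(scoville)
--         if min_scov > K:
--             return answer
--         heapq.heappush(scoville,min_scov+heapq.heappop(scoville)*2)
--         answer += 1
--     if heapq.heappop(scoville) > K:
--         return answer
--     return -1
-- ===== SOURCE B (Python) =====
-- def solution(scoville, K):
--     s = sorted(scoville)
--     answer = 0
--     while len(s) > 1: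
--         if s[0] > K:
--             return answer
--         merged = s[0] + 2 * s[1]
--         rest = s[2:]
--         i = 0
--         while i < len(rest) and rest[i] < merged:
--             i += 1
--         rest.insert(i, merged)
--         s = rest
--         answer += 1
--     if s[0] > K:
--         return answer
--     return -1
-- ===== Notes on version B (the rewrite author's own statement) =====
-- stated objective: alternative
-- what changed: Replaces the binary heap (heapify/heappop/heappush) with a sorted list maintained by a linear-scan insertion of each merged value; the minimum is always the list head.
import Mathlib
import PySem

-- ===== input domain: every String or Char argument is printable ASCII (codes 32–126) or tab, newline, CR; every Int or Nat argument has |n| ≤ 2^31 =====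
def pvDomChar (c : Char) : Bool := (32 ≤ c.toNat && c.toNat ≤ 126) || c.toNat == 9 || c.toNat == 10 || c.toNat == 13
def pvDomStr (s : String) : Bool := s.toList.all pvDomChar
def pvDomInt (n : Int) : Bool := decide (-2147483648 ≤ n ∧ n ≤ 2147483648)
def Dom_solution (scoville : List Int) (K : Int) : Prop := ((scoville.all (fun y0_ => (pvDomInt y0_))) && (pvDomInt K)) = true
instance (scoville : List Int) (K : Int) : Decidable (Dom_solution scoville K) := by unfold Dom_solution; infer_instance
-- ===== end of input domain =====

-- B replaces A's binary heap (heapq) by a sorted list with linear-scan insertion (alternative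
-- data structure, not claimed faster). A mutates its argument in place (heapify/pops); B does not:
-- the equivalence proved here is about the RETURN value only.

-- ===== PORT A =====
-- A uses the heapq module; its functions (CPython's heapify/heappop/heappush with _siftup/_siftdown)
-- are ported literally below. All index reads/writes stay in range, so getD/set are exact.
-- Each while loop carries a fuel argument that is always sufficient at the call sites
-- (pos strictly decreases / increases below the length), so the fuel-0 fallback is never hit.

-- while loop of heapq._siftdown (newitem is the value being sifted up; pos decreases, fuel = pos)
def siftdownLoop : Nat → List Int → Nat → Nat → Int → List Int
  | 0, heap, _, pos, newitem => heap.set pos newitem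
  | fuel + 1, heap, startpos, pos, newitem =>
    if startpos < pos then
      if newitem < heap.getD ((pos - 1) / 2) 0 then
        siftdownLoop fuel (heap.set pos (heap.getD ((pos - 1) / 2) 0)) startpos ((pos - 1) / 2)
          newitem
      else heap.set pos newitem
    else heap.set pos newitem

-- heapq._siftdown
def siftdown (heap : List Int) (startpos pos : Nat) : List Int :=
  siftdownLoop pos heap startpos pos (heap.getD pos 0)

-- heapq._siftup's while loop (hole sifted to a leaf, then _siftdown back up; pos increases
-- while 2*pos+1 < length, so fuel = length is sufficient)
def siftupLoop : Nat → List Int → Nat → Nat → Int → List Int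
  | 0, heap, startpos, pos, newitem => siftdown (heap.set pos newitem) startpos pos
  | fuel + 1, heap, startpos, pos, newitem =>
    if 2 * pos + 1 < heap.length then
      let childpos :=
        if 2 * pos + 2 < heap.length ∧ ¬ (heap.getD (2 * pos + 1) 0 < heap.getD (2 * pos + 2) 0)
        then 2 * pos + 2 else 2 * pos + 1
      siftupLoop fuel (heap.set pos (heap.getD childpos 0)) startpos childpos newitem
    else siftdown (heap.set pos newitem) startpos pos

-- heapq._siftup
def siftup (heap : List Int) (pos : Nat) : List Int :=
  siftupLoop heap.length heap pos pos (heap.getD pos 0)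

-- heapq.heappop as a pure function returning (popped value, remaining heap).
-- Python raises IndexError on []; the total form returns (0, []) there — excluded by Pre_solution.
def heappop (heap : List Int) : Int × List Int :=
  let lastelt := heap.getLast?.getD 0
  let rest := heap.dropLast
  if rest.length ≠ 0 then (rest.getD 0 0, siftup (rest.set 0 lastelt) 0)
  else (lastelt, rest)

-- heapq.heappush as a pure function
def heappush (heap : List Int) (item : Int) : List Int :=
  siftdown (heap ++ [item]) 0 heap.length

-- for i in reversed(range(n//2)): _siftup(x, i)
def heapifyLoop (heap : List Int) (i : Nat) : List Int :=
  match i with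
  | 0 => heap
  | Nat.succ j => heapifyLoop (siftup heap j) j

def heapify (heap : List Int) : List Int := heapifyLoop heap (heap.length / 2)

-- the while loop of A's solution (each iteration shortens the heap by one, fuel = length)
def solutionLoop : Nat → List Int → Int → Int → Int
  | 0, heap, K, answer => if (heappop heap).1 > K then answer else -1
  | fuel + 1, heap, K, answer =>
    if 1 < heap.length then
      let p1 := heappop heap
      if p1.1 > K then answer
      else
        let p2 := heappop p1.2
        solutionLoop fuel (heappush p2.2 (p1.1 + p2.1 * 2)) K (answer + 1)
    else if (heappop heap).1 > K then answer else -1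

def solution (scoville : List Int) (K : Int) : Int :=
  solutionLoop scoville.length (heapify scoville) K 0

-- ===== PORT B =====
-- the inner scan: first index ≥ i with not (rest[i] < merged); fuel = rest.length
def findPos : Nat → List Int → Nat → Int → Nat
  | 0, _, i, _ => i
  | fuel + 1, rest, i, merged =>
    if i < rest.length ∧ rest.getD i 0 < merged then findPos fuel rest (i + 1) merged else i

-- the while loop of B's solution (s is kept sorted; indices 0,1 are in range under the guard;
-- each iteration shortens s by one, fuel = length)
def altLoop : Nat → List Int → Int → Int → Int
  | 0, s, K, answer => if s.getD 0 0 > K then answer else -1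
  | fuel + 1, s, K, answer =>
    if 1 < s.length then
      if s.getD 0 0 > K then answer
      else
        let merged := s.getD 0 0 + 2 * s.getD 1 0
        let rest := PySem.List.slice s (some 2) none
        altLoop fuel (PySem.List.insert rest ((findPos rest.length rest 0 merged : Nat) : Int) merged)
          K (answer + 1)
    else if s.getD 0 0 > K then answer else -1

def solution_alt (scoville : List Int) (K : Int) : Int :=
  altLoop scoville.length (PySem.List.sorted scoville (fun x => x) false) K 0

-- ===== PRECONDITION & SPEC =====
-- Python A raises IndexError (heappop from an empty list) when scoville = []; B likewise raises there.
def Pre_solution (scoville : List Int) (K : Int) : Prop := scoville ≠ []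
instance (scoville : List Int) (K : Int) : Decidable (Pre_solution scoville K) := by
  unfold Pre_solution; infer_instance

def pvWitness_solution : List Int × Int := ([1, 2, 3, 9, 10, 12], 7)

def Spec_solution (scoville : List Int) (K : Int) (out : Int) : Prop := out = solution_alt scoville K
instance (scoville : List Int) (K : Int) (out : Int) : Decidable (Spec_solution scoville K out) := by
  unfold Spec_solution; infer_instance

-- ===== CLAIM (what is proved, stated in full; the proofs are below) =====
def Claim_equal_solution : Prop := ∀ (scoville : List Int) (K : Int), Dom_solution scoville K → Pre_solution scoville K → Spec_solution scoville K (solution scoville K)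

-- ===== LEMMAS AND PROOFS =====

-- ancestor relation of positions in the implicit binary tree (s is an ancestor of p)
def ancB (s p : Nat) : Bool :=
  if s < p then ancB s ((p - 1) / 2) else s == p
  termination_by p
  decreasing_by omega

-- heap property on all edges whose parent index is ≥ b
def IsHeapD (l : List Int) (b : Nat) : Prop :=
  ∀ c, c < l.length → b ≤ (c - 1) / 2 → l.getD ((c - 1) / 2) 0 ≤ l.getD c 0

theorem ancB_le {s : Nat} : ∀ p, ancB s p = true → s ≤ p := by
  intro p
  induction p using Nat.strong_induction_on with
  | _ p ih =>
    intro h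
    rw [ancB] at h
    by_cases hlt : s < p
    · omega
    · simp [hlt] at h; omega

theorem ancB_refl (s : Nat) : ancB s s = true := by rw [ancB]; simp

theorem ancB_zero (p : Nat) : ancB 0 p = true := by
  induction p using Nat.strong_induction_on with
  | _ p ih =>
    rw [ancB]
    by_cases h : 0 < p
    · simpa [h] using ih _ (by omega)
    · simp [h]; omega

theorem ancB_parent {s p : Nat} (h : ancB s p = true) (hlt : s < p) :
    ancB s ((p - 1) / 2) = true := by
  rw [ancB] at h; simpa [hlt] using h

theorem ancB_child {s p c : Nat} (h : ancB s p = true) (hc : (c - 1) / 2 = p) (hcp : p < c) :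
    ancB s c = true := by
  have hs := ancB_le _ h
  rw [ancB]; simp only [show s < c by omega, if_pos, hc]; exact h

theorem getD_set_self (l : List Int) (i : Nat) (h : i < l.length) (a : Int) :
    (l.set i a).getD i 0 = a := by
  simp [List.getD_eq_getElem?_getD, h]

theorem getD_set_ne (l : List Int) (i j : Nat) (h : i ≠ j) (a : Int) :
    (l.set i a).getD j 0 = l.getD j 0 := by
  simp [List.getD_eq_getElem?_getD, List.getElem?_set_ne, h]

theorem set_getD_self (l : List Int) (i : Nat) (h : i < l.length) :
    l.set i (l.getD i 0) = l := by
  have : l.getD i 0 = l[i] := List.getD_eq_getElem l 0 h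
  rw [this, List.set_getElem_self]

theorem mset_set : ∀ (l : List Int) (i : Nat), i < l.length → ∀ a : Int,
    ((l.set i a : List Int) : Multiset Int) + {l.getD i 0} = (l : Multiset Int) + {a} := by
  intro l
  induction l with
  | nil => intro i h; simp at h
  | cons x t ih =>
    intro i h a
    cases i with
    | zero =>
      show ((a :: t : List Int) : Multiset Int) + {(x :: t).getD 0 0} = _
      rw [List.getD_cons_zero, ← Multiset.cons_coe, ← Multiset.cons_coe,
        Multiset.cons_add, Multiset.cons_add]
      rw [show ({x} : Multiset Int) = x ::ₘ 0 from rfl, show ({a} : Multiset Int) = a ::ₘ 0 from rfl]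
      rw [show ((t : Multiset Int) + (x ::ₘ 0)) = x ::ₘ ((t : Multiset Int) + 0) from
        (Multiset.add_cons _ _ _),
        show ((t : Multiset Int) + (a ::ₘ 0)) = a ::ₘ ((t : Multiset Int) + 0) from
        (Multiset.add_cons _ _ _)]
      exact Multiset.cons_swap a x _
    | succ j =>
      have hj : j < t.length := by simpa using h
      have H := ih j hj a
      show ((x :: t.set j a : List Int) : Multiset Int) + {(x :: t).getD (j + 1) 0} = _
      rw [List.getD_cons_succ, ← Multiset.cons_coe, ← Multiset.cons_coe,
        Multiset.cons_add, Multiset.cons_add, H]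

theorem mset_set_set (l : List Int) (i j : Nat) (x : Int) (hij : i ≠ j)
    (hi : i < l.length) (hj : j < l.length) :
    (((l.set i (l.getD j 0)).set j x : List Int) : Multiset Int)
      = ((l.set i x : List Int) : Multiset Int) := by
  have h1 := mset_set (l.set i (l.getD j 0)) j (by simpa using hj) x
  have h2 := mset_set l i hi (l.getD j 0)
  have h3 := mset_set l i hi x
  rw [getD_set_ne l i j hij] at h1
  have key : (((l.set i (l.getD j 0)).set j x : List Int) : Multiset Int)
      + ({l.getD j 0} + {l.getD i 0})
      = ((l.set i x : List Int) : Multiset Int) + ({l.getD j 0} + {l.getD i 0}) := by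
    calc (((l.set i (l.getD j 0)).set j x : List Int) : Multiset Int) + ({l.getD j 0} + {l.getD i 0})
        = ((((l.set i (l.getD j 0)) : List Int) : Multiset Int) + {x}) + {l.getD i 0} := by
          rw [← h1]; abel
      _ = (((l : List Int) : Multiset Int) + {l.getD j 0}) + {x} := by rw [← h2]; abel
      _ = (((l.set i x : List Int) : Multiset Int) + {l.getD i 0}) + {l.getD j 0} := by
          rw [h3]; abel
      _ = ((l.set i x : List Int) : Multiset Int) + ({l.getD j 0} + {l.getD i 0}) := by abel
  exact add_right_cancel key

theorem siftdownLoop_spec :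
    ∀ (fuel : Nat) (l : List Int) (startpos pos : Nat) (newitem : Int),
      pos ≤ fuel → pos < l.length → ancB startpos pos = true →
      (∀ c, c < l.length → startpos ≤ (c - 1) / 2 → (c - 1) / 2 ≠ pos → c ≠ pos →
        l.getD ((c - 1) / 2) 0 ≤ l.getD c 0) →
      (∀ c, c < l.length → (c - 1) / 2 = pos → c ≠ pos → newitem ≤ l.getD c 0) →
      (∀ c, c < l.length → (c - 1) / 2 = pos → c ≠ pos → startpos < pos →
        l.getD ((pos - 1) / 2) 0 ≤ l.getD c 0) →
      IsHeapD (siftdownLoop fuel l startpos pos newitem) startpos ∧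
      ((siftdownLoop fuel l startpos pos newitem : List Int) : Multiset Int)
        = ((l.set pos newitem : List Int) : Multiset Int) := by
  intro fuel
  induction fuel with
  | zero =>
    intro l startpos pos newitem hf hpos hanc ha h2 h3
    obtain rfl : pos = 0 := by omega
    simp only [siftdownLoop]
    constructor
    · intro c hc hq
      simp only [List.length_set] at hc
      by_cases hcp : c = 0
      · have hq2 : (c - 1) / 2 = c := by omega
        rw [hq2]
      · by_cases hqp : (c - 1) / 2 = 0
        · rw [hqp, getD_set_self l 0 hpos newitem, getD_set_ne l 0 c (Ne.symm hcp) newitem]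
          exact h2 c hc hqp hcp
        · rw [getD_set_ne l 0 ((c - 1) / 2) (Ne.symm hqp) newitem,
            getD_set_ne l 0 c (Ne.symm hcp) newitem]
          exact ha c hc hq hqp hcp
    · trivial
  | succ fuel ih =>
    intro l startpos pos newitem hf hpos hanc ha h2 h3
    rw [siftdownLoop]
    by_cases hsp : startpos < pos
    · rw [if_pos hsp]
      by_cases hlt : newitem < l.getD ((pos - 1) / 2) 0
      · rw [if_pos hlt]
        have hpp : (pos - 1) / 2 < pos := by omega
        have hppl : (pos - 1) / 2 < l.length := by omega
        have hancpp := ancB_parent hanc hsp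
        have hspp : startpos ≤ (pos - 1) / 2 := ancB_le _ hancpp
        obtain ⟨H1, H2⟩ := ih (l.set pos (l.getD ((pos - 1) / 2) 0))
            startpos ((pos - 1) / 2) newitem (by omega) (by simpa using hppl) hancpp
          (by -- heap-except-hole survives moving the parent down into the hole
            intro c hc hq hqne hcne
            simp only [List.length_set] at hc
            have hcp : c ≠ pos := by intro e; apply hqne; rw [e]
            rw [getD_set_ne l pos c (Ne.symm hcp) (l.getD ((pos - 1) / 2) 0)]
            by_cases hqp : (c - 1) / 2 = pos
            · rw [hqp, getD_set_self l pos hpos (l.getD ((pos - 1) / 2) 0)]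
              exact h3 c hc hqp hcp hsp
            · rw [getD_set_ne l pos ((c - 1) / 2) (Ne.symm hqp) (l.getD ((pos - 1) / 2) 0)]
              exact ha c hc hq hqp hcp)
          (by -- newitem stays below every child of the new hole
            intro c hc hq hcne
            simp only [List.length_set] at hc
            by_cases hcp : c = pos
            · rw [hcp, getD_set_self l pos hpos (l.getD ((pos - 1) / 2) 0)]
              exact le_of_lt hlt
            · rw [getD_set_ne l pos c (Ne.symm hcp) (l.getD ((pos - 1) / 2) 0)]
              have h4 := ha c hc (by rw [hq]; exact hspp) (by rw [hq]; omega) hcp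
              rw [hq] at h4
              exact le_trans (le_of_lt hlt) h4
          )
          (by -- the new hole's parent value stays below the new hole's children
            intro c hc hq hcne hsppp
            simp only [List.length_set] at hc
            rw [getD_set_ne l pos (((pos - 1) / 2 - 1) / 2) (by omega) (l.getD ((pos - 1) / 2) 0)]
            have hedge : l.getD (((pos - 1) / 2 - 1) / 2) 0 ≤ l.getD ((pos - 1) / 2) 0 :=
              ha ((pos - 1) / 2) hppl (ancB_le _ (ancB_parent hancpp hsppp)) (by omega) (by omega)
            by_cases hcp : c = pos
            · rw [hcp, getD_set_self l pos hpos (l.getD ((pos - 1) / 2) 0)]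
              exact hedge
            · rw [getD_set_ne l pos c (Ne.symm hcp) (l.getD ((pos - 1) / 2) 0)]
              have h4 := ha c hc (by rw [hq]; omega) (by rw [hq]; omega) hcp
              rw [hq] at h4
              exact le_trans hedge h4)
        refine ⟨H1, ?_⟩
        rw [H2]
        exact mset_set_set l pos ((pos - 1) / 2) newitem (by omega) hpos hppl
      · rw [if_neg hlt]
        constructor
        · intro c hc hq
          simp only [List.length_set] at hc
          by_cases hcp : c = pos
          · rw [hcp, getD_set_ne l pos ((pos - 1) / 2) (by omega) newitem,
              getD_set_self l pos hpos newitem]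
            exact not_lt.mp hlt
          · by_cases hqp : (c - 1) / 2 = pos
            · rw [hqp, getD_set_self l pos hpos newitem,
                getD_set_ne l pos c (Ne.symm hcp) newitem]
              exact h2 c hc hqp hcp
            · rw [getD_set_ne l pos ((c - 1) / 2) (Ne.symm hqp) newitem,
                getD_set_ne l pos c (Ne.symm hcp) newitem]
              exact ha c hc hq hqp hcp
        · rfl
    · rw [if_neg hsp]
      have hps : startpos = pos := by have := ancB_le _ hanc; omega
      constructor
      · intro c hc hq
        simp only [List.length_set] at hc
        by_cases hcp : c = pos
        · have hq2 : (c - 1) / 2 = c := by omega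
          rw [hq2]
        · by_cases hqp : (c - 1) / 2 = pos
          · rw [hqp, getD_set_self l pos hpos newitem,
              getD_set_ne l pos c (Ne.symm hcp) newitem]
            exact h2 c hc hqp hcp
          · rw [getD_set_ne l pos ((c - 1) / 2) (Ne.symm hqp) newitem,
              getD_set_ne l pos c (Ne.symm hcp) newitem]
            exact ha c hc hq hqp hcp
      · rfl

theorem siftupLoop_spec :
    ∀ (k : Nat) (l : List Int) (startpos pos : Nat) (newitem : Int),
      l.length - pos ≤ k → pos < l.length → ancB startpos pos = true →
      (∀ c, c < l.length → startpos ≤ (c - 1) / 2 → (c - 1) / 2 ≠ pos →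
        l.getD ((c - 1) / 2) 0 ≤ l.getD c 0) →
      (∀ c, c < l.length → (c - 1) / 2 = pos → c ≠ pos → startpos < pos →
        l.getD ((pos - 1) / 2) 0 ≤ l.getD c 0) →
      IsHeapD (siftupLoop k l startpos pos newitem) startpos ∧
      ((siftupLoop k l startpos pos newitem : List Int) : Multiset Int)
        = ((l.set pos newitem : List Int) : Multiset Int) := by
  intro k
  induction k with
  | zero => intro l startpos pos newitem hk hpos; omega
  | succ k ihk =>
    intro l startpos pos newitem hk hpos hanc hA hB
    rw [siftupLoop]
    by_cases h : 2 * pos + 1 < l.length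
    · rw [if_pos h]
      set cstar := if 2 * pos + 2 < l.length ∧ ¬ (l.getD (2 * pos + 1) 0 < l.getD (2 * pos + 2) 0)
        then 2 * pos + 2 else 2 * pos + 1 with hcdef
      show IsHeapD (siftupLoop k (l.set pos (l.getD cstar 0)) startpos cstar newitem) startpos ∧ _
      have hc1 : pos < cstar := by rw [hcdef]; split <;> omega
      have hc2 : cstar < l.length := by rw [hcdef]; split <;> omega
      have hc3 : (cstar - 1) / 2 = pos := by rw [hcdef]; split <;> omega
      have hchoice : ∀ s, s < l.length → (s - 1) / 2 = pos → s ≠ pos →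
          l.getD cstar 0 ≤ l.getD s 0 := by
        intro s hs hsp2 hsnp
        have hs12 : s = 2 * pos + 1 ∨ s = 2 * pos + 2 := by omega
        rw [hcdef]; split
        · rcases hs12 with rfl | rfl
          · exact not_lt.mp (by tauto)
          · exact le_refl _
        · rcases hs12 with rfl | rfl
          · exact le_refl _
          · exact le_of_lt (by tauto)
      obtain ⟨H1, H2⟩ := ihk (l.set pos (l.getD cstar 0)) startpos cstar newitem
        (by simp only [List.length_set]; omega) (by simpa using hc2)
        (ancB_child hanc hc3 hc1)
        (by -- heap-except-hole survives moving the chosen child up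
          intro c hc hq hqne
          simp only [List.length_set] at hc
          by_cases hqp : (c - 1) / 2 = pos
          · by_cases hcc : c = cstar
            · rw [hcc, hc3, getD_set_self l pos hpos _,
                getD_set_ne l pos cstar (by omega) _]
            · by_cases hcpos : c = pos
              · rw [hcpos] at hqp ⊢
                rw [show (pos - 1) / 2 = pos by omega]
              · rw [hqp, getD_set_self l pos hpos _,
                  getD_set_ne l pos c (Ne.symm hcpos) _]
                exact hchoice c hc hqp hcpos
          · rw [getD_set_ne l pos ((c - 1) / 2) (Ne.symm hqp) _]
            by_cases hcpos : c = pos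
            · rw [hcpos, getD_set_self l pos hpos _]
              rw [hcpos] at hq hqp
              have hsp2 : startpos < pos := by omega
              exact hB cstar hc2 hc3 (by omega) hsp2
            · rw [getD_set_ne l pos c (Ne.symm hcpos) _]
              exact hA c hc hq hqp)
        (by -- the moved-up child value stays below the new hole's children
          intro d hd hdq hdne hspc
          simp only [List.length_set] at hd
          have hdpos : pos < d := by omega
          rw [hc3, getD_set_self l pos hpos _, getD_set_ne l pos d (by omega) _]
          have hsple : startpos ≤ pos := ancB_le _ hanc
          have h4 := hA d hd (by rw [hdq]; omega) (by rw [hdq]; omega)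
          rw [hdq] at h4
          exact h4)
      refine ⟨H1, ?_⟩
      rw [H2]
      exact mset_set_set l pos cstar newitem (by omega) hpos hc2
    · rw [if_neg h, siftdown, getD_set_self l pos hpos newitem]
      obtain ⟨H1, H2⟩ := siftdownLoop_spec pos (l.set pos newitem) startpos pos newitem
        (le_refl pos) (by simpa using hpos) hanc
        (by intro c hc hq hqne hcne
            simp only [List.length_set] at hc
            rw [getD_set_ne l pos ((c - 1) / 2) (Ne.symm hqne) newitem,
              getD_set_ne l pos c (Ne.symm hcne) newitem]
            exact hA c hc hq hqne)
        (by intro c hc hcq hcne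
            simp only [List.length_set] at hc
            omega)
        (by intro c hc hcq hcne hsp
            simp only [List.length_set] at hc
            omega)
      refine ⟨H1, ?_⟩
      rw [H2, List.set_set]

theorem siftdownLoop_length : ∀ (fuel : Nat) (l : List Int) (sp pos : Nat) (n : Int),
    (siftdownLoop fuel l sp pos n).length = l.length := by
  intro fuel
  induction fuel with
  | zero => intro l sp pos n; simp [siftdownLoop]
  | succ f ih =>
    intro l sp pos n
    rw [siftdownLoop]
    split
    · split
      · rw [ih]; simp
      · simp
    · simp

theorem siftupLoop_length : ∀ (fuel : Nat) (l : List Int) (sp pos : Nat) (n : Int),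
    (siftupLoop fuel l sp pos n).length = l.length := by
  intro fuel
  induction fuel with
  | zero => intro l sp pos n; simp [siftupLoop, siftdown, siftdownLoop_length]
  | succ f ih =>
    intro l sp pos n
    rw [siftupLoop]
    split
    · rw [ih]; simp
    · simp [siftdown, siftdownLoop_length]

theorem heappop_length (heap : List Int) :
    (heappop heap).2.length = heap.length - 1 := by
  have hd : heap.dropLast.length = heap.length - 1 := heap.length_dropLast
  by_cases h : heap.length - 1 = 0 <;>
    simp [heappop, hd, h, siftup, siftupLoop_length]

theorem heappush_length (heap : List Int) (item : Int) :
    (heappush heap item).length = heap.length + 1 := by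
  simp [heappush, siftdown, siftdownLoop_length]

theorem getD_dropLast (l : List Int) (i : Nat) (h : i < l.length - 1) :
    l.dropLast.getD i 0 = l.getD i 0 := by
  rw [List.getD_eq_getElem _ 0 (by simp; omega), List.getD_eq_getElem _ 0 (by omega)]
  simp [List.getElem_dropLast]

theorem isHeapD_root_le (l : List Int) (hh : IsHeapD l 0) :
    ∀ i, i < l.length → l.getD 0 0 ≤ l.getD i 0 := by
  intro i
  induction i using Nat.strong_induction_on with
  | _ i ih =>
    intro hi
    by_cases h0 : i = 0
    · rw [h0]
    · have e1 := hh i hi (by omega)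
      have e2 := ih ((i - 1) / 2) (by omega) (by omega)
      exact le_trans e2 e1

theorem isHeapD_min (l : List Int) (hh : IsHeapD l 0) : ∀ y ∈ l, l.getD 0 0 ≤ y := by
  intro y hy
  obtain ⟨i, hi, rfl⟩ := List.mem_iff_getElem.mp hy
  have := isHeapD_root_le l hh i hi
  rwa [List.getD_eq_getElem l 0 hi] at this

theorem heapifyLoop_spec : ∀ (i : Nat) (l : List Int), i ≤ l.length → IsHeapD l i →
    IsHeapD (heapifyLoop l i) 0 ∧
    ((heapifyLoop l i : List Int) : Multiset Int) = (l : Multiset Int) := by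
  intro i
  induction i with
  | zero => intro l hi hh; exact ⟨hh, rfl⟩
  | succ j ih =>
    intro l hi hh
    show IsHeapD (heapifyLoop (siftup l j) j) 0 ∧ _
    obtain ⟨H1, H2⟩ := siftupLoop_spec l.length l j j (l.getD j 0) (by omega) (by omega)
      (ancB_refl j)
      (fun c hc hq hqne => hh c hc (by omega))
      (fun c hc hcq hcne hlt => absurd hlt (lt_irrefl j))
    have hlen : (siftup l j).length = l.length := siftupLoop_length l.length l j j (l.getD j 0)
    obtain ⟨G1, G2⟩ := ih (siftup l j) (by omega) H1
    refine ⟨G1, ?_⟩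
    show ((heapifyLoop (siftup l j) j : List Int) : Multiset Int) = _
    rw [G2]
    show ((siftupLoop l.length l j j (l.getD j 0) : List Int) : Multiset Int) = _
    rw [H2, set_getD_self l j (by omega)]

theorem heapify_spec (l : List Int) :
    IsHeapD (heapify l) 0 ∧ ((heapify l : List Int) : Multiset Int) = (l : Multiset Int) := by
  refine heapifyLoop_spec (l.length / 2) l (by omega) ?_
  intro c hc hq
  have hc0 : (c - 1) / 2 = c := by omega
  rw [hc0]

theorem heappop_spec (l : List Int) (hne : l ≠ []) (hh : IsHeapD l 0) :
    IsHeapD (heappop l).2 0 ∧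
    (heappop l).1 ::ₘ ((heappop l).2 : Multiset Int) = (l : Multiset Int) ∧
    ∀ y ∈ l, (heappop l).1 ≤ y := by
  have hlen : 0 < l.length := List.length_pos_of_ne_nil hne
  by_cases h1 : l.length = 1
  · obtain ⟨a, rfl⟩ := List.length_eq_one_iff.mp h1
    refine ⟨?_, ?_, ?_⟩
    · intro c hc hq; simp [heappop] at hc
    · simp [heappop]
    · intro y hy; simp [heappop]; simp at hy; omega
  · have hlen2 : 2 ≤ l.length := by omega
    have hrl : l.dropLast.length = l.length - 1 := l.length_dropLast
    have hcond : l.dropLast.length ≠ 0 := by omega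
    have hpop : heappop l
        = (l.dropLast.getD 0 0, siftup (l.dropLast.set 0 (l.getLast?.getD 0)) 0) := by
      simp [heappop]
      intro h
      exact absurd h (by omega)
    have hsl : siftup (l.dropLast.set 0 (l.getLast?.getD 0)) 0
        = siftupLoop (l.dropLast.set 0 (l.getLast?.getD 0)).length
            (l.dropLast.set 0 (l.getLast?.getD 0)) 0 0 (l.getLast?.getD 0) := by
      rw [siftup, getD_set_self l.dropLast 0 (by omega) _]
    rw [hpop, hsl]
    have hvals : ∀ i, i ≠ 0 → i < l.length - 1 →
        (l.dropLast.set 0 (l.getLast?.getD 0)).getD i 0 = l.getD i 0 := by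
      intro i hi0 hil
      rw [getD_set_ne _ 0 i (Ne.symm hi0), getD_dropLast l i hil]
    obtain ⟨H1, H2⟩ := siftupLoop_spec (l.dropLast.set 0 (l.getLast?.getD 0)).length
        (l.dropLast.set 0 (l.getLast?.getD 0)) 0 0 (l.getLast?.getD 0)
      (by omega) (by simp; omega) (ancB_refl 0)
      (by intro c hc hq hqne
          simp only [List.length_set] at hc
          have hcb : 3 ≤ c := by omega
          rw [hvals _ (by omega) (by omega), hvals _ (by omega) (by omega)]
          exact hh c (by omega) (by omega))
      (fun c hc hcq hcne hlt => absurd hlt (lt_irrefl 0))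
    refine ⟨H1, ?_, ?_⟩
    · -- multiset bookkeeping: popped ::ₘ remaining = original
      rw [H2, List.set_set]
      have hms := mset_set l.dropLast 0 (by omega) (l.getLast?.getD 0)
      have hgl : l.getLast? = some (l.getLast hne) := List.getLast?_eq_some_getLast hne
      have hsplit : l.dropLast ++ [l.getLast hne] = l := List.dropLast_append_getLast hne
      have hml : (l : Multiset Int)
          = (l.dropLast : Multiset Int) + {l.getLast?.getD 0} := by
        conv_lhs => rw [← hsplit]
        rw [hgl, Option.getD_some, ← Multiset.coe_add, Multiset.coe_singleton]
      rw [← Multiset.singleton_add, add_comm, hms, hml]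
    · intro y hy
      have := isHeapD_min l hh y hy
      rwa [← getD_dropLast l 0 (by omega)] at this

theorem heappush_spec (l : List Int) (x : Int) (hh : IsHeapD l 0) :
    IsHeapD (heappush l x) 0 ∧
    ((heappush l x : List Int) : Multiset Int) = x ::ₘ (l : Multiset Int) := by
  have hgd : (l ++ [x]).getD l.length 0 = x := by
    rw [List.getD_eq_getElem?_getD, List.getElem?_append_right (le_refl _)]
    simp
  have hleft : ∀ i, i < l.length → (l ++ [x]).getD i 0 = l.getD i 0 := by
    intro i hi
    rw [List.getD_eq_getElem?_getD, List.getElem?_append_left hi,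
      List.getD_eq_getElem?_getD]
  rw [heappush, siftdown, hgd]
  obtain ⟨H1, H2⟩ := siftdownLoop_spec l.length (l ++ [x]) 0 l.length x (le_refl _)
    (by simp) (ancB_zero _)
    (by intro c hc hq hqne hcne
        simp only [List.length_append, List.length_singleton] at hc
        rw [hleft _ (by omega), hleft _ (by omega)]
        exact hh c (by omega) (by omega))
    (by intro c hc hcq hcne
        simp only [List.length_append, List.length_singleton] at hc
        omega)
    (by intro c hc hcq hcne hsp
        simp only [List.length_append, List.length_singleton] at hc
        omega)
  refine ⟨H1, ?_⟩
  rw [H2]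
  have hms := mset_set (l ++ [x]) l.length (by simp) x
  rw [hgd] at hms
  rw [add_right_cancel hms]
  rw [← Multiset.singleton_add, add_comm, ← Multiset.coe_add, Multiset.coe_singleton]

theorem findPos_spec : ∀ (k : Nat) (rest : List Int) (i : Nat) (v : Int),
    rest.length - i ≤ k → i ≤ rest.length →
    i ≤ findPos k rest i v ∧ findPos k rest i v ≤ rest.length ∧
    (∀ j, i ≤ j → j < findPos k rest i v → rest.getD j 0 < v) ∧
    (findPos k rest i v < rest.length → ¬ rest.getD (findPos k rest i v) 0 < v) := by
  intro k
  induction k with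
  | zero =>
    intro rest i v hk hi
    simp only [findPos]
    exact ⟨le_refl _, hi, fun j h1 h2 => absurd h2 (by omega),
      fun hcon => absurd hcon (by omega)⟩
  | succ k ih =>
    intro rest i v hk hi
    rw [findPos]
    by_cases hcond : i < rest.length ∧ rest.getD i 0 < v
    · rw [if_pos hcond]
      obtain ⟨ha1, ha2, ha3, ha4⟩ := ih rest (i + 1) v (by omega) (by omega)
      refine ⟨by omega, ha2, ?_, ha4⟩
      intro j hj1 hj2
      by_cases hj : j = i
      · rw [hj]; exact hcond.2
      · exact ha3 j (by omega) hj2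
    · rw [if_neg hcond]
      exact ⟨le_refl _, hi, fun j h1 h2 => absurd h2 (by omega),
        fun hlt hv => hcond ⟨hlt, hv⟩⟩

-- inserting at the scanned position keeps the list sorted and adds the value
theorem insert_step (rest : List Int) (hs : rest.Pairwise (· ≤ ·)) (v : Int) :
    (PySem.List.insert rest ((findPos rest.length rest 0 v : Nat) : Int) v).Pairwise (· ≤ ·) ∧
    ((PySem.List.insert rest ((findPos rest.length rest 0 v : Nat) : Int) v : List Int) : Multiset Int)
      = v ::ₘ (rest : Multiset Int) := by
  obtain ⟨h0, hle, hlt, hge⟩ := findPos_spec rest.length rest 0 v (by omega) (by omega)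
  rw [PySem.List.insert_natCast rest (findPos rest.length rest 0 v) v hle]
  have hpg := List.pairwise_iff_getElem.mp hs
  have hdle : ∀ b ∈ rest.drop (findPos rest.length rest 0 v), v ≤ b := by
    intro b hb
    obtain ⟨m, hm, rfl⟩ := List.mem_iff_getElem.mp hb
    rw [List.getElem_drop]
    have hp : findPos rest.length rest 0 v < rest.length := by
      simp only [List.length_drop] at hm; omega
    have h5 : v ≤ rest[findPos rest.length rest 0 v] := by
      have := hge hp
      rw [List.getD_eq_getElem rest 0 hp] at this
      omega
    by_cases hm0 : m = 0
    · subst hm0; simpa using h5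
    · refine le_trans h5 (hpg (findPos rest.length rest 0 v)
        (findPos rest.length rest 0 v + m) hp ?_ (by omega))
      simp only [List.length_drop] at hm; omega
  have htlt : ∀ x ∈ rest.take (findPos rest.length rest 0 v), x < v := by
    intro x hx
    obtain ⟨j, hj, rfl⟩ := List.mem_iff_getElem.mp hx
    rw [List.getElem_take]
    have hjp : j < findPos rest.length rest 0 v := by
      simp only [List.length_take] at hj; omega
    have hjl : j < rest.length := by omega
    have := hlt j (by omega) hjp
    rwa [List.getD_eq_getElem rest 0 hjl] at this
  constructor
  · rw [List.pairwise_append]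
    refine ⟨List.Pairwise.sublist (List.take_sublist ..) hs, ?_, ?_⟩
    · rw [List.pairwise_cons]
      exact ⟨hdle, List.Pairwise.sublist (List.drop_sublist ..) hs⟩
    · intro x hx b hb
      have hxv := htlt x hx
      rcases List.mem_cons.mp hb with rfl | hbd
      · exact le_of_lt hxv
      · exact le_trans (le_of_lt hxv) (hdle b hbd)
  · refine Multiset.coe_eq_coe.mpr (List.Perm.trans List.perm_middle ?_)
    rw [List.take_append_drop]

theorem sorted_head_le (s : List Int) (hs : s.Pairwise (· ≤ ·)) :
    ∀ y ∈ s, s.getD 0 0 ≤ y := by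
  cases s with
  | nil => intro y hy; simp at hy
  | cons a t =>
    intro y hy
    rw [List.getD_cons_zero]
    rcases List.mem_cons.mp hy with rfl | hyt
    · exact le_refl _
    · exact List.rel_of_pairwise_cons hs hyt

theorem solutionLoop_small (fuel : Nat) (h : List Int) (K ans : Int) (hl : ¬ 1 < h.length) :
    solutionLoop fuel h K ans = if (heappop h).1 > K then ans else -1 := by
  cases fuel with
  | zero => rfl
  | succ f => rw [solutionLoop, if_neg hl]

theorem altLoop_small (fuel : Nat) (s : List Int) (K ans : Int) (hl : ¬ 1 < s.length) :
    altLoop fuel s K ans = if s.getD 0 0 > K then ans else -1 := by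
  cases fuel with
  | zero => rfl
  | succ f => rw [altLoop, if_neg hl]

-- on heaps/lists of at most one element both final branches read the same value
theorem small_if_eq (h s : List Int) (K ans : Int) (hl : h.length ≤ 1)
    (hm : (h : Multiset Int) = (s : Multiset Int)) :
    (if (heappop h).1 > K then ans else (-1 : Int))
      = (if s.getD 0 0 > K then ans else -1) := by
  have hcard : h.length = s.length := by have := congrArg Multiset.card hm; simpa using this
  by_cases h0 : h.length = 0
  · obtain rfl : h = [] := List.eq_nil_of_length_eq_zero h0
    obtain rfl : s = [] := List.eq_nil_of_length_eq_zero (by omega)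
    simp [heappop]
  · obtain ⟨x, rfl⟩ := List.length_eq_one_iff.mp (show h.length = 1 by omega)
    obtain ⟨y, rfl⟩ := List.length_eq_one_iff.mp (show s.length = 1 by omega)
    have hxy : x = y := by simpa using hm
    rw [hxy]
    simp [heappop]

-- the main bridge: the heap loop of A and the sorted-list loop of B agree
-- whenever heap and list hold the same multiset
theorem loop_eq : ∀ (fh fs : Nat) (h s : List Int) (K ans : Int),
    h.length ≤ fh + 1 → s.length ≤ fs + 1 →
    (h : Multiset Int) = (s : Multiset Int) → IsHeapD h 0 → s.Pairwise (· ≤ ·) →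
    solutionLoop fh h K ans = altLoop fs s K ans := by
  intro fh
  induction fh with
  | zero =>
    intro fs h s K ans hfh hfs hm hh hs
    have hcard : h.length = s.length := by have := congrArg Multiset.card hm; simpa using this
    rw [solutionLoop_small 0 h K ans (by omega), altLoop_small fs s K ans (by omega)]
    exact small_if_eq h s K ans (by omega) hm
  | succ k ihk =>
    intro fs h s K ans hfh hfs hm hh hs
    have hcard : h.length = s.length := by have := congrArg Multiset.card hm; simpa using this
    by_cases hl : 1 < h.length
    · have hls : 1 < s.length := by omega
      obtain ⟨fs', rfl⟩ : ∃ fs', fs = fs' + 1 := by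
        cases fs with
        | zero => omega
        | succ f => exact ⟨f, rfl⟩
      rw [solutionLoop, altLoop, if_pos hl, if_pos hls]
      have hne : h ≠ [] := by intro e; rw [e] at hl; simp at hl
      obtain ⟨P1, P2, P3⟩ := heappop_spec h hne hh
      obtain ⟨a, b, t, rfl⟩ : ∃ a b t, s = a :: b :: t := by
        rcases s with _ | ⟨a, s'⟩
        · simp at hls
        rcases s' with _ | ⟨b, t⟩
        · simp at hls
        · exact ⟨a, b, t, rfl⟩
      have hfst : (heappop h).1 = a := by
        have hmem_h : (heappop h).1 ∈ h := by
          rw [← Multiset.mem_coe, ← P2]; exact Multiset.mem_cons_self _ _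
        have hmem_s : (heappop h).1 ∈ (a :: b :: t) := by
          rw [← Multiset.mem_coe, ← hm, Multiset.mem_coe]; exact hmem_h
        have hamem : a ∈ h := by
          rw [← Multiset.mem_coe, hm, Multiset.mem_coe]; exact List.mem_cons_self ..
        have hu : (heappop h).1 ≤ a := P3 a hamem
        have hd : a ≤ (heappop h).1 := by
          have := sorted_head_le (a :: b :: t) hs _ hmem_s
          rwa [List.getD_cons_zero] at this
        omega
      have hgd0 : (a :: b :: t).getD 0 0 = a := List.getD_cons_zero
      by_cases hK : (heappop h).1 > K
      · rw [if_pos hK, if_pos (by rw [hgd0, ← hfst]; exact hK)]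
      · rw [if_neg hK, if_neg (by rw [hgd0, ← hfst]; exact hK)]
        have hlp := heappop_length h
        have hne1 : (heappop h).2 ≠ [] := by
          intro e; rw [e] at hlp; simp at hlp; omega
        obtain ⟨Q1, Q2, Q3⟩ := heappop_spec (heappop h).2 hne1 P1
        have hsbt : (b :: t).Pairwise (· ≤ ·) := (List.pairwise_cons.mp hs).2
        have hm1 : ((heappop h).2 : Multiset Int) = ((b :: t : List Int) : Multiset Int) := by
          have e1 : (heappop h).1 ::ₘ ((heappop h).2 : Multiset Int)
              = a ::ₘ ((b :: t : List Int) : Multiset Int) := by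
            rw [P2, hm, ← Multiset.cons_coe]
          rw [hfst] at e1
          exact (Multiset.cons_inj_right a).mp e1
        have hsnd : (heappop (heappop h).2).1 = b := by
          have hmem_h : (heappop (heappop h).2).1 ∈ (heappop h).2 := by
            rw [← Multiset.mem_coe, ← Q2]; exact Multiset.mem_cons_self _ _
          have hmem_s : (heappop (heappop h).2).1 ∈ (b :: t) := by
            rw [← Multiset.mem_coe, ← hm1, Multiset.mem_coe]; exact hmem_h
          have hbmem : b ∈ (heappop h).2 := by
            rw [← Multiset.mem_coe, hm1, Multiset.mem_coe]; exact List.mem_cons_self ..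
          have hu : (heappop (heappop h).2).1 ≤ b := Q3 b hbmem
          have hd : b ≤ (heappop (heappop h).2).1 := by
            have := sorted_head_le (b :: t) hsbt _ hmem_s
            rwa [List.getD_cons_zero] at this
          omega
        have hm2 : ((heappop (heappop h).2).2 : Multiset Int) = ((t : List Int) : Multiset Int) := by
          have e1 : (heappop (heappop h).2).1 ::ₘ ((heappop (heappop h).2).2 : Multiset Int)
              = b ::ₘ ((t : List Int) : Multiset Int) := by
            rw [Q2, hm1, ← Multiset.cons_coe]
          rw [hsnd] at e1
          exact (Multiset.cons_inj_right b).mp e1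
        obtain ⟨R1, R2⟩ := heappush_spec (heappop (heappop h).2).2
          ((heappop h).1 + (heappop (heappop h).2).1 * 2) Q1
        have hgd1 : (a :: b :: t).getD 1 0 = b := rfl
        have hrest : PySem.List.slice (a :: b :: t) (some 2) none = t := by
          simp [PySem.List.slice_from]
        have hst : t.Pairwise (· ≤ ·) := (List.pairwise_cons.mp hsbt).2
        rw [hgd0, hgd1, hrest]
        obtain ⟨S1, S2⟩ := insert_step t hst (a + 2 * b)
        have hql := heappop_length (heappop h).2
        refine ihk fs' _ _ K (ans + 1) ?_ ?_ ?_ R1 S1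
        · rw [heappush_length]; omega
        · rw [PySem.List.length_insert]
          have : (a :: b :: t).length = t.length + 2 := rfl
          omega
        · rw [R2, S2, hm2, hfst, hsnd]
          congr 1
          ring
    · rw [solutionLoop_small (k + 1) h K ans hl, altLoop_small fs s K ans (by omega)]
      exact small_if_eq h s K ans (by omega) hm

-- ===== VERDICT (by name: the statement is the Claim_ definition above) =====
theorem solution_spec : Claim_equal_solution := by
  intro scoville K _hd _hp
  show solution scoville K = solution_alt scoville K
  unfold solution solution_alt
  obtain ⟨H1, H2⟩ := heapify_spec scoville
  have hlen : (heapify scoville).length = scoville.length := by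
    have := congrArg Multiset.card H2; simpa using this
  have hslen : (PySem.List.sorted scoville (fun x => x) false).length = scoville.length :=
    PySem.List.length_sorted ..
  refine loop_eq scoville.length scoville.length _ _ K 0 (by omega) (by omega) ?_ H1 ?_
  · rw [H2]
    exact (Multiset.coe_eq_coe.mpr (PySem.List.sorted_perm ..)).symm
  · have := PySem.List.sorted_pairwise (xs := scoville) (key := fun x => x)
    simpa using this
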